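-- pv_equiv track=rewrite | github.com/Rohit-roe/ai-code-generator | backend/test_repair.py | _find_last_complete_string_pos
-- ===== SOURCE A (Python) =====
-- BACKSLASH = chr(92)
--
-- def _is_backslash(ch):
--     return ch == BACKSLASH
--
-- def _find_last_complete_string_pos(text):
--     last_closed_quote = -1
--     in_string = False
--     escape_next = False
--     for i, ch in enumerate(text):
--         if escape_next:
--             escape_next = False
--             continue
--         if _is_backslash(ch):
--             escape_next = True
--             continue
--         if ch == '"':
--             if in_string:
--                 last_closed_quote = i
--             in_string = not in_string
--     return last_closed_quote
-- ===== SOURCE B (Python) =====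
-- BACKSLASH = chr(92)
--
-- def _find_last_complete_string_pos(text):
--     # Collect positions of all unescaped double quotes, skipping escaped
--     # characters by jumping the index, then decide the answer by parity:
--     # quotes alternate open/close, so only odd-ordinal quotes close a string.
--     quotes = []
--     i, n = 0, len(text)
--     while i < n:
--         ch = text[i]
--         if ch == BACKSLASH:
--             i += 2
--             continue
--         if ch == '"':
--             quotes.append(i)
--         i += 1
--     if len(quotes) < 2:
--         return -1
--     return quotes[-1] if len(quotes) % 2 == 0 else quotes[-2]
-- ===== Notes on version B (the rewrite author's own statement) =====
-- stated objective: alternative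
-- what changed: B replaces A's running in_string/last_closed_quote state machine by an index-jumping scan that only collects the positions of unescaped quotes, then picks the last closing quote arithmetically by parity of the quote count.
import Mathlib
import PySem

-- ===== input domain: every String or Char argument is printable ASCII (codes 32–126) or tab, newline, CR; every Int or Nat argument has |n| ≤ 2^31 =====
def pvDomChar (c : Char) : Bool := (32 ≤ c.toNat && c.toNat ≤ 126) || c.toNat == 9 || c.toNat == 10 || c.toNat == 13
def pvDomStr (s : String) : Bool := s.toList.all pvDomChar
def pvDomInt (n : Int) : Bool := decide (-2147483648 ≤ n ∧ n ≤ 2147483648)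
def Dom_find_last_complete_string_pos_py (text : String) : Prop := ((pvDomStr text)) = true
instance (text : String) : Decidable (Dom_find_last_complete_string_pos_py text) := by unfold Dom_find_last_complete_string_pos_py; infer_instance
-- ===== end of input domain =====

-- B collects unescaped-quote positions with an index-jumping scan and decides the
-- answer by parity, instead of A's running in_string/last_closed_quote state machine.

-- ===== PORT A =====
-- loop body of A: state (last_closed_quote, in_string, escape_next)
def pvAStep (st : Int × Bool × Bool) (ic : Int × Char) : Int × Bool × Bool :=
  if st.2.2 then (st.1, st.2.1, false)
  else if ic.2 = Char.ofNat 92 then (st.1, st.2.1, true)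
  else if ic.2 = '"' then
    (if st.2.1 then (ic.1, !st.2.1, false) else (st.1, !st.2.1, false))
  else (st.1, st.2.1, false)

def find_last_complete_string_pos_py (text : String) : Int :=
  ((PySem.List.enumerate text.toList 0).foldl pvAStep (-1, false, false)).1

-- ===== PORT B =====
-- B's while loop: collect indices of unescaped double quotes, jumping by 2 after a backslash
def pvCollectQuotes : List Char → Int → List Int
  | [], _ => []
  | c :: rest, i =>
    if c = Char.ofNat 92 then pvCollectQuotes rest.tail (i + 2)
    else if c = '"' then i :: pvCollectQuotes rest (i + 1)
    else pvCollectQuotes rest (i + 1)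
  termination_by l _ => l.length
  decreasing_by
    · simp only [List.length_cons, List.length_tail]; omega
    · simp
    · simp

def find_last_complete_string_pos_py_alt (text : String) : Int :=
  let q := pvCollectQuotes text.toList 0
  if q.length < 2 then -1
  else if q.length % 2 == 0 then (PySem.List.pyGet? q (-1)).getD (-1)
  else (PySem.List.pyGet? q (-2)).getD (-1)

-- ===== PRECONDITION & SPEC =====
def Spec_find_last_complete_string_pos_py (text : String) (out : Int) : Prop := out = find_last_complete_string_pos_py_alt text
instance (text : String) (out : Int) : Decidable (Spec_find_last_complete_string_pos_py text out) := by unfold Spec_find_last_complete_string_pos_py; infer_instance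

-- ===== CLAIM (what is proved, stated in full; the proofs are below) =====
def Claim_equal_find_last_complete_string_pos_py : Prop := ∀ (text : String), Dom_find_last_complete_string_pos_py text → Spec_find_last_complete_string_pos_py text (find_last_complete_string_pos_py text)

-- ===== LEMMAS AND PROOFS =====

-- last odd-ordinal element (the last "closing quote") of a quote-position list,
-- starting with in_string = ins; mirrors A's state machine restricted to quotes
def pvLastOdd (ins : Bool) (q : List Int) (last : Int) : Int :=
  match q with
  | [] => last
  | x :: xs => if ins then pvLastOdd false xs x else pvLastOdd true xs last

-- closed form of pvLastOdd
def pvE (ins : Bool) (q : List Int) (last : Int) : Int :=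
  if (decide (q.length % 2 = 1)) = ins then q.getLast?.getD last
  else q.dropLast.getLast?.getD last

theorem pvGetLast_cons (x : Int) (xs : List Int) (a : Int) :
    (x :: xs).getLast?.getD a = xs.getLast?.getD x := by
  cases xs with
  | nil => simp
  | cons y ys =>
    rw [List.getLast?_cons_cons]
    have h : (y :: ys).getLast?.isSome := by simp
    obtain ⟨z, hz⟩ := Option.isSome_iff_exists.mp h
    simp [hz]

theorem pvGetD_irrel {l : List Int} (h : l ≠ []) (a b : Int) :
    l.getLast?.getD a = l.getLast?.getD b := by
  have hs : l.getLast?.isSome := by simp [h]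
  obtain ⟨z, hz⟩ := Option.isSome_iff_exists.mp hs
  simp [hz]

theorem pvLastOdd_eq_E (q : List Int) : ∀ (ins : Bool) (last : Int),
    pvLastOdd ins q last = pvE ins q last := by
  induction q with
  | nil => intro ins last; simp [pvLastOdd, pvE]
  | cons x xs ih =>
    intro ins last
    cases ins with
    | true =>
      rw [show pvLastOdd true (x :: xs) last = pvLastOdd false xs x from rfl, ih]
      unfold pvE
      simp only [List.length_cons]
      by_cases hp : xs.length % 2 = 1
      · have hne : xs ≠ [] := by intro h; simp [h] at hp
        have h2 : ¬ ((xs.length + 1) % 2 = 1) := by omega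
        simp only [hp, h2, decide_true, decide_false]
        rw [if_neg (by simp), if_neg (by simp)]
        cases xs with
        | nil => exact absurd rfl hne
        | cons y ys =>
          show (y :: ys).dropLast.getLast?.getD x
              = (x :: (y :: ys).dropLast).getLast?.getD last
          exact (pvGetLast_cons x (y :: ys).dropLast last).symm
      · have h2 : (xs.length + 1) % 2 = 1 := by omega
        simp only [hp, h2, decide_true, decide_false]
        rw [if_pos trivial, if_pos trivial]
        exact (pvGetLast_cons x xs last).symm
    | false =>
      rw [show pvLastOdd false (x :: xs) last = pvLastOdd true xs last from rfl, ih]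
      unfold pvE
      simp only [List.length_cons]
      by_cases hp : xs.length % 2 = 1
      · have hne : xs ≠ [] := by intro h; simp [h] at hp
        have h2 : ¬ ((xs.length + 1) % 2 = 1) := by omega
        simp only [hp, h2, decide_true, decide_false]
        rw [if_pos trivial, if_pos trivial]
        rw [pvGetLast_cons x xs last]
        exact pvGetD_irrel hne last x
      · have h2 : (xs.length + 1) % 2 = 1 := by omega
        simp only [hp, h2, decide_true, decide_false]
        rw [if_neg (by simp), if_neg (by simp)]
        cases xs with
        | nil => simp
        | cons y ys =>
          show (y :: ys).dropLast.getLast?.getD last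
              = (x :: (y :: ys).dropLast).getLast?.getD last
          rw [pvGetLast_cons x (y :: ys).dropLast last]
          have hne2 : (y :: ys).dropLast ≠ [] := by
            have hl : (y :: ys).dropLast.length = ys.length := by simp
            intro h
            rw [h] at hl
            simp only [List.length_cons] at hp
            simp at hl
            omega
          exact pvGetD_irrel hne2 last x

theorem pvMain (l : List Char) (i : Int) : ∀ (last : Int) (ins : Bool),
    ((PySem.List.enumerate l i).foldl pvAStep (last, ins, false)).1
      = pvLastOdd ins (pvCollectQuotes l i) last := by
  induction l, i using pvCollectQuotes.induct with
  | case1 i0 =>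
    intro last ins
    simp [PySem.List.enumerate_nil, pvCollectQuotes, pvLastOdd]
  | case2 rest i ih =>
    intro last ins
    rw [show pvCollectQuotes (Char.ofNat 92 :: rest) i = pvCollectQuotes rest.tail (i + 2) by
      rw [pvCollectQuotes]; simp]
    rw [PySem.List.enumerate_cons]
    simp only [List.foldl_cons]
    rw [show pvAStep (last, ins, false) (i, Char.ofNat 92) = (last, ins, true) by
      simp [pvAStep]]
    cases rest with
    | nil => simp [PySem.List.enumerate_nil, pvCollectQuotes, pvLastOdd]
    | cons d rest2 =>
      rw [PySem.List.enumerate_cons]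
      simp only [List.foldl_cons]
      rw [show pvAStep (last, ins, true) (i + 1, d) = (last, ins, false) by simp [pvAStep]]
      have h21 : i + 1 + 1 = i + 2 := by ring
      rw [h21]
      exact ih last ins
  | case3 rest i hq ih =>
    intro last ins
    rw [show pvCollectQuotes ('"' :: rest) i = i :: pvCollectQuotes rest (i + 1) by
      rw [pvCollectQuotes]; simp]
    rw [PySem.List.enumerate_cons]
    simp only [List.foldl_cons]
    cases ins with
    | true =>
      rw [show pvAStep (last, true, false) (i, '"') = (i, false, false) by
        simp [pvAStep]]
      rw [show pvLastOdd true (i :: pvCollectQuotes rest (i + 1)) last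
          = pvLastOdd false (pvCollectQuotes rest (i + 1)) i from rfl]
      exact ih i false
    | false =>
      rw [show pvAStep (last, false, false) (i, '"') = (last, true, false) by
        simp [pvAStep]]
      rw [show pvLastOdd false (i :: pvCollectQuotes rest (i + 1)) last
          = pvLastOdd true (pvCollectQuotes rest (i + 1)) last from rfl]
      exact ih last true
  | case4 c rest i hc hq ih =>
    intro last ins
    rw [show pvCollectQuotes (c :: rest) i = pvCollectQuotes rest (i + 1) by
      rw [pvCollectQuotes]; simp [hc, hq]]
    rw [PySem.List.enumerate_cons]
    simp only [List.foldl_cons]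
    rw [show pvAStep (last, ins, false) (i, c) = (last, ins, false) by
      simp [pvAStep, hc, hq]]
    exact ih last ins

theorem pvDropLast_getLast? (q : List Int) (h : 2 ≤ q.length) :
    q.dropLast.getLast? = q[q.length - 2]? := by
  rw [List.getLast?_eq_getElem?, List.getElem?_dropLast]
  rw [List.length_dropLast]
  rw [if_pos (by omega)]
  congr 1

-- ===== VERDICT (by name: the statement is the Claim_ definition above) =====
theorem find_last_complete_string_pos_py_spec : Claim_equal_find_last_complete_string_pos_py := by
  intro text _
  unfold Spec_find_last_complete_string_pos_py
  unfold find_last_complete_string_pos_py find_last_complete_string_pos_py_alt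
  rw [pvMain, pvLastOdd_eq_E]
  set q := pvCollectQuotes text.toList 0 with hq
  unfold pvE
  by_cases hlen : q.length < 2
  · rw [if_pos hlen]
    interval_cases h : q.length
    · match q, h with
      | [], _ => simp
    · match q, h with
      | [x], _ => simp
  · rw [if_neg hlen]
    rw [Nat.not_lt] at hlen
    rcases Nat.mod_two_eq_zero_or_one q.length with he | ho
    · simp only [he]
      rw [if_pos (by decide), if_pos (by decide)]
      rw [PySem.List.pyGet?_neg_one]
    · simp only [ho]
      rw [if_neg (by decide), if_neg (by decide)]
      rw [PySem.List.pyGet?_neg_ofNat q 2 (by omega) (by omega)]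
      rw [pvDropLast_getLast? q hlen]
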